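-- pv_equiv track=rewrite | github.com/hyoungj00n/codingtest | 프로그래머스/lv1/42840. 모의고사/모의고사.py | solution
-- ===== SOURCE A (Python) =====
-- def solution(answers):
--     answer = []
--     field1 = [1,2,3,4,5]
--     field2 = [2,1,2,3,2,4,2,5]
--     field3 = [3,3,1,1,2,2,4,4,5,5]
--     score = [0,0,0]
--
--     for i, ans in enumerate(answers):
--         if ans == field1[i % len(field1)]:
--             score[0] +=1
--         if ans == field2[i % len(field2)]:
--             score[1] +=1
--         if ans == field3[i % len(field3)]:
--             score[2] +=1
--
--     for i, ans in enumerate(score):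
--         if ans == max(score):
--             answer.append(i+1)
--     return answer
-- ===== SOURCE B (Python) =====
-- def solution(answers):
--     patterns = [[1, 2, 3, 4, 5],
--                 [2, 1, 2, 3, 2, 4, 2, 5],
--                 [3, 3, 1, 1, 2, 2, 4, 4, 5, 5]]
--     scores = []
--     for pat in patterns:
--         c = 0
--         q = pat
--         for a in answers:
--             if a == q[0]:
--                 c += 1
--             q = q[1:] + q[:1]
--         scores.append(c)
--     best = max(scores)
--     return [k + 1 for k, s in enumerate(scores) if s == best]
-- ===== Notes on version B (the rewrite author's own statement) =====
-- stated objective: alternative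
-- what changed: A makes one flat pass with three inline modulo-indexed checks into a mutable score triple; B counts each pattern in its own pass using a rotating queue (rotate the pattern by one slice step per answer and compare its head) with no index arithmetic at all, then selects the max indices.
import Mathlib
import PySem

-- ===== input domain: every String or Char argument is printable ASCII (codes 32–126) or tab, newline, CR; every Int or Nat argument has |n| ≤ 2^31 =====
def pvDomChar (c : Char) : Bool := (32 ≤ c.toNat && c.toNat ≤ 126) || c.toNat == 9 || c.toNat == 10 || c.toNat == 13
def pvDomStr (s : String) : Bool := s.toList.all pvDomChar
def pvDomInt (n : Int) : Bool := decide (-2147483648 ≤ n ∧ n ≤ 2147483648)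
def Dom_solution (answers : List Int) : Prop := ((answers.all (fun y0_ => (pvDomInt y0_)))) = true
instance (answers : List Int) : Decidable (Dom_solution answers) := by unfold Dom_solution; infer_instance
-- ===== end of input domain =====

-- B replaces A's single flat pass with three inline modulo-indexed checks by one pass
-- per pattern over a rotating queue (slice-rotate, compare the head); same O(n) cost.

-- ===== PORT A =====
def pvField1 : List Int := [1,2,3,4,5]
def pvField2 : List Int := [2,1,2,3,2,4,2,5]
def pvField3 : List Int := [3,3,1,1,2,2,4,4,5,5]

def solution (answers : List Int) : List Int :=
  let score := (PySem.List.enumerate answers).foldl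
    (fun (s : Int × Int × Int) (p : Int × Int) =>
      let s := if p.2 = PySem.List.pyGetD pvField1 (PySem.Int.mod p.1 5) 0 then (s.1 + 1, s.2.1, s.2.2) else s
      let s := if p.2 = PySem.List.pyGetD pvField2 (PySem.Int.mod p.1 8) 0 then (s.1, s.2.1 + 1, s.2.2) else s
      if p.2 = PySem.List.pyGetD pvField3 (PySem.Int.mod p.1 10) 0 then (s.1, s.2.1, s.2.2 + 1) else s)
    (0, 0, 0)
  let scoreL := [score.1, score.2.1, score.2.2]
  (PySem.List.enumerate scoreL).foldl
    (fun acc (p : Int × Int) =>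
      if p.2 = (PySem.List.max? scoreL (fun x => x)).getD 0 then acc ++ [p.1 + 1] else acc) []

-- ===== PORT B =====
-- inner loop: rotate the pattern queue one step per answer, compare its head
def pvRotCount (pat : List Int) (answers : List Int) : Int :=
  (answers.foldl
    (fun (s : Int × List Int) a =>
      (if a = PySem.List.pyGetD s.2 0 0 then s.1 + 1 else s.1,
       PySem.List.slice s.2 (some 1) none ++ PySem.List.slice s.2 none (some 1)))
    (0, pat)).1

def solution_alt (answers : List Int) : List Int :=
  let scores := [[1,2,3,4,5], [2,1,2,3,2,4,2,5], [3,3,1,1,2,2,4,4,5,5]].map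
    (fun pat => pvRotCount pat answers)
  let best := (PySem.List.max? scores (fun x => x)).getD 0
  (PySem.List.enumerate scores).foldl
    (fun acc (p : Int × Int) => if p.2 = best then acc ++ [p.1 + 1] else acc) []

-- ===== PRECONDITION & SPEC =====
def Spec_solution (answers : List Int) (out : List Int) : Prop := out = solution_alt answers
instance (answers : List Int) (out : List Int) : Decidable (Spec_solution answers out) := by unfold Spec_solution; infer_instance

-- ===== CLAIM =====
def Claim_equal_solution : Prop := ∀ (answers : List Int), Dom_solution answers → Spec_solution answers (solution answers)

-- ===== LEMMAS AND PROOFS =====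

-- reference count: matches of answers against pat read cyclically starting at index j
def pvMCount (pat : List Int) : Nat → List Int → Int
  | _, [] => 0
  | j, a :: t => (if a = pat.getD (j % pat.length) 0 then 1 else 0) + pvMCount pat (j+1) t

-- one rotation step of B equals List.rotate by one
theorem rot_step (q : List Int) (hq : q ≠ []) :
    PySem.List.slice q (some 1) none ++ PySem.List.slice q none (some 1) = q.rotate 1 := by
  have h1 : PySem.List.slice q (some 1) none = q.drop 1 := by
    rw [show (1 : Int) = ((1 : Nat) : Int) by norm_num, PySem.List.slice_from_natCast]
  have h2 : PySem.List.slice q none (some 1) = q.take 1 := by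
    rw [show (1 : Int) = ((1 : Nat) : Int) by norm_num, PySem.List.slice_to_natCast]
  rw [h1, h2, List.rotate_eq_drop_append_take (by cases q <;> simp_all)]

-- B's rotating fold computes pvMCount
theorem rot_fold (pat : List Int) (hp : pat ≠ []) :
    ∀ (ans : List Int) (j : Nat) (c : Int),
    (ans.foldl
      (fun (s : Int × List Int) a =>
        (if a = PySem.List.pyGetD s.2 0 0 then s.1 + 1 else s.1,
         PySem.List.slice s.2 (some 1) none ++ PySem.List.slice s.2 none (some 1)))
      (c, pat.rotate j)).1 = c + pvMCount pat j ans := by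
  intro ans
  induction ans with
  | nil => intro j c; simp [pvMCount]
  | cons a t ih =>
    intro j c
    have hlen : 0 < pat.length := List.length_pos_iff.mpr hp
    have hrot : pat.rotate j ≠ [] := fun h => hp (List.rotate_eq_nil_iff.mp h)
    have hhead : PySem.List.pyGetD (pat.rotate j) 0 0 = pat.getD (j % pat.length) 0 := by
      have h0 : (0 : Nat) < (pat.rotate j).length := by simpa [List.length_rotate] using hlen
      have := List.getElem_rotate pat j 0 h0
      simp only [Nat.zero_add] at this
      rw [show ((0 : Int)) = ((0 : Nat) : Int) by norm_num, PySem.List.pyGetD_natCast]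
      rw [List.getD_eq_getElem _ _ h0, this, List.getD_eq_getElem _ _ (Nat.mod_lt _ hlen)]
    simp only [List.foldl_cons, rot_step _ hrot, List.rotate_rotate, pvMCount, hhead]
    rw [ih (j+1)]
    split_ifs <;> ring

theorem rotCount_eq (pat : List Int) (hp : pat ≠ []) (ans : List Int) :
    pvRotCount pat ans = pvMCount pat 0 ans := by
  have := rot_fold pat hp ans 0 0
  simpa [pvRotCount, List.rotate_zero] using this

-- A's enumerate fold computes pvMCount too
theorem enum_fold (pat : List Int) (L : Int) (hL : L = (pat.length : Int)) :
    ∀ (ans : List Int) (j : Nat) (c : Int),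
    (PySem.List.enumerate ans (j : Int)).foldl
      (fun x (p : Int × Int) => if p.2 = PySem.List.pyGetD pat (PySem.Int.mod p.1 L) 0 then x + 1 else x) c
    = c + pvMCount pat j ans := by
  intro ans
  induction ans with
  | nil => intro j c; simp [PySem.List.enumerate_nil, pvMCount]
  | cons a t ih =>
    intro j c
    have hcast : ((j : Int) + 1) = ((j + 1 : Nat) : Int) := by push_cast; ring
    have hmod : PySem.Int.mod ((j : Nat) : Int) L = ((j % pat.length : Nat) : Int) := by
      rw [hL]; exact PySem.Int.mod_natCast j pat.length
    simp only [PySem.List.enumerate_cons, List.foldl_cons, hcast, hmod,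
      PySem.List.pyGetD_natCast, pvMCount]
    rw [ih (j+1)]
    split_ifs <;> ring

-- A's triple-state fold splits into the three independent counting folds
theorem tri_fold (Lst : List (Int × Int)) (a b c : Int) :
    Lst.foldl
      (fun (s : Int × Int × Int) (p : Int × Int) =>
        let s := if p.2 = PySem.List.pyGetD pvField1 (PySem.Int.mod p.1 5) 0 then (s.1 + 1, s.2.1, s.2.2) else s
        let s := if p.2 = PySem.List.pyGetD pvField2 (PySem.Int.mod p.1 8) 0 then (s.1, s.2.1 + 1, s.2.2) else s
        if p.2 = PySem.List.pyGetD pvField3 (PySem.Int.mod p.1 10) 0 then (s.1, s.2.1, s.2.2 + 1) else s)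
      (a, b, c)
    = (Lst.foldl (fun x (p : Int × Int) => if p.2 = PySem.List.pyGetD pvField1 (PySem.Int.mod p.1 5) 0 then x + 1 else x) a,
       Lst.foldl (fun x (p : Int × Int) => if p.2 = PySem.List.pyGetD pvField2 (PySem.Int.mod p.1 8) 0 then x + 1 else x) b,
       Lst.foldl (fun x (p : Int × Int) => if p.2 = PySem.List.pyGetD pvField3 (PySem.Int.mod p.1 10) 0 then x + 1 else x) c) := by
  induction Lst generalizing a b c with
  | nil => rfl
  | cons hd tl ih =>
    simp only [List.foldl_cons]
    rw [← ih]
    congr 1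
    split_ifs <;> rfl

-- ===== VERDICT =====
theorem solution_spec : Claim_equal_solution := by
  intro answers _
  unfold Spec_solution solution solution_alt
  simp only [List.map]
  rw [tri_fold]
  have h1 := enum_fold pvField1 5 (by decide) answers 0 0
  have h2 := enum_fold pvField2 8 (by decide) answers 0 0
  have h3 := enum_fold pvField3 10 (by decide) answers 0 0
  simp only [Nat.cast_zero, zero_add] at h1 h2 h3
  have r1 := rotCount_eq pvField1 (by decide) answers
  have r2 := rotCount_eq pvField2 (by decide) answers
  have r3 := rotCount_eq pvField3 (by decide) answers
  simp only [pvField1, pvField2, pvField3] at h1 h2 h3 r1 r2 r3 ⊢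
  simp only [h1, h2, h3, ← r1, ← r2, ← r3]
  rfl
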